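-- pv_equiv track=rewrite | github.com/Hoomanxj/eztutor | app/queries.py | get_timedelta
-- ===== SOURCE A (Python) =====
-- def get_timedelta(w_list, q, r):
--     """
--
--     find `timedelta` values of each session
--
--     Args:
--         -list: w_list
--         -int: q - quotient
--         -int: r - remainder
--
--     Returns:
--         - [], False: If arguments are not given or operation fails
--         -deltas, True, If success, a list of deltas to be added to every session to calculate their date
--             relative to start date
--     """
--
--     if not w_list or not q:
--         return [], False
--     # calculate timedelta list which finds each session's position in calendar relative to the first session
--     deltas = []
--     for i in range(q):
--         for pair in w_list:
--             key, value = next(iter(pair.items()))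
--             delta = 7*i + pair[key]
--             deltas.append(delta)
--     for pair in w_list[:r]:
--         key, value = next(iter(pair.items()))
--         delta = 7 * q + pair[key]
--         deltas.append(delta)
--     return deltas, True
-- ===== SOURCE B (Python) =====
-- def get_timedelta(w_list, q, r):
--     if not w_list or not q:
--         return [], False
--     base = [next(iter(p.items()))[1] for p in w_list]
--     deltas = []
--     week = base
--     for _ in range(q):
--         deltas.extend(week)
--         week = [x + 7 for x in week]
--     deltas.extend(7 * q + v for v in base[:r])
--     return deltas, True
-- ===== Notes on version B (the rewrite author's own statement) =====
-- stated objective: alternative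
-- what changed: A recomputes 7*i and re-extracts each dict's single value in every pass of its nested loops (and again in the remainder loop); B extracts the values once into a base list and then maintains a running 'week' list that it appends and shifts by +7 each iteration, finishing with a mapped slice of base for the remainder.
-- outside the precondition, e.g. on get_timedelta([{}], -1, 0): A returns ([], True), B raises StopIteration
import Mathlib
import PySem

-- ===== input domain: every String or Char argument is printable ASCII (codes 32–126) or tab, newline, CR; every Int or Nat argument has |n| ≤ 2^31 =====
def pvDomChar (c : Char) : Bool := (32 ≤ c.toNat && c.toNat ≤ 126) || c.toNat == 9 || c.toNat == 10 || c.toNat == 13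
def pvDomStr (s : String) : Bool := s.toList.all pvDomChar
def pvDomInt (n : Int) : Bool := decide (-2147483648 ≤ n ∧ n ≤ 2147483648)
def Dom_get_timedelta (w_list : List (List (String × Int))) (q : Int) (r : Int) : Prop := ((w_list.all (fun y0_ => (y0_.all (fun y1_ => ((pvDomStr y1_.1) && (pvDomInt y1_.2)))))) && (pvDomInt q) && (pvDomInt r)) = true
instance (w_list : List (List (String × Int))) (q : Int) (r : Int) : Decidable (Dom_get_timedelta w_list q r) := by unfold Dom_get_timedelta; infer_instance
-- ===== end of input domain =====

-- B replaces A's nested loops (which recompute 7*i and re-extract each dict's value every pass)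
-- by one extraction pass into a base list and a running 'week' accumulator that is appended and
-- shifted by +7 each iteration (objective: alternative decomposition, same asymptotic cost).

-- ===== PORT A =====
-- each dict[str,int] element of w_list is modelled as PySem.Dict built from its assoc list
def get_timedelta (w_list : List (List (String × Int))) (q : Int) (r : Int) : List Int × Bool :=
  if w_list.isEmpty || q == 0 then ([], false)
  else
    let deltas : List Int :=
      (PySem.List.pyRange 0 q 1).foldl (fun acc i =>
        w_list.foldl (fun acc pair =>
          let d := PySem.Dict.ofList pair
          match d.items with
          | [] => acc                -- next(iter(pair.items())) raises StopIteration: outside Pre_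
          | (key, _) :: _ => acc ++ [7 * i + d.getD key 0]) acc) []   -- pair[key]: key present, getD exact
    let deltas :=
      (PySem.List.slice w_list none (some r)).foldl (fun acc pair =>
        let d := PySem.Dict.ofList pair
        match d.items with
        | [] => acc                -- StopIteration: outside Pre_
        | (key, _) :: _ => acc ++ [7 * q + d.getD key 0]) deltas
    (deltas, true)

-- ===== PORT B =====
def get_timedelta_alt (w_list : List (List (String × Int))) (q : Int) (r : Int) : List Int × Bool :=
  if w_list.isEmpty || q == 0 then ([], false)
  else
    let base : List Int :=
      w_list.map (fun p => (((PySem.Dict.ofList p).items.head?).map Prod.snd).getD 0)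
        -- next(iter(p.items()))[1]; head? = none is Python's StopIteration: outside Pre_
    let st : List Int × List Int :=
      (PySem.List.pyRange 0 q 1).foldl
        (fun (acc : List Int × List Int) _ => (acc.1 ++ acc.2, acc.2.map (fun x => x + 7)))
        ([], base)
        -- the loop state is (deltas, week); week is shifted by +7 each iteration
    let tail : List Int := (PySem.List.slice base none (some r)).map (fun v => 7 * q + v)
    (st.1 ++ tail, true)

-- ===== PRECONDITION & SPEC =====
-- Pre_ excludes inputs containing an empty dict while the body runs (w_list nonempty, q ≠ 0):
-- there A raises StopIteration whenever such a dict is iterated, and B's single extraction pass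
-- raises StopIteration on any empty dict even when q < 0 makes A's loops skip it and return ([], True).
def Pre_get_timedelta (w_list : List (List (String × Int))) (q : Int) (r : Int) : Prop :=
  (w_list.isEmpty || q == 0 || w_list.all (fun p => !p.isEmpty)) = true
instance (w_list : List (List (String × Int))) (q : Int) (r : Int) : Decidable (Pre_get_timedelta w_list q r) := by unfold Pre_get_timedelta; infer_instance
def pvWitness_get_timedelta : (List (List (String × Int))) × Int × Int :=
  ([[("a", 3)], [("b", 5)]], 2, 1)
def Spec_get_timedelta (w_list : List (List (String × Int))) (q : Int) (r : Int) (out : List Int × Bool) : Prop := out = get_timedelta_alt w_list q r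
instance (w_list : List (List (String × Int))) (q : Int) (r : Int) (out : List Int × Bool) : Decidable (Spec_get_timedelta w_list q r out) := by unfold Spec_get_timedelta; infer_instance

-- ===== CLAIM (what is proved, stated in full; the proofs are below) =====
def Claim_equal_get_timedelta : Prop := ∀ (w_list : List (List (String × Int))) (q : Int) (r : Int), Dom_get_timedelta w_list q r → Pre_get_timedelta w_list q r → Spec_get_timedelta w_list q r (get_timedelta w_list q r)

-- ===== LEMMAS AND PROOFS =====

-- the value B extracts from one dict: the value of its first item
def pvFval (p : List (String × Int)) : Int :=
  (((PySem.Dict.ofList p).items.head?).map Prod.snd).getD 0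

lemma pv_items_insert_ne {d : PySem.Dict String Int} (k : String) (v : Int) :
    (d.insert k v).items ≠ [] := by
  rw [PySem.Dict.items_insert]
  split_ifs with h
  · intro he
    rw [List.map_eq_nil_iff] at he
    have hk : k ∈ d.keys := (PySem.Dict.contains_iff_mem_keys d k).mp h
    simp only [PySem.Dict.keys, he] at hk
    simp at hk
  · simp

lemma pv_foldl_items_ne (l : List (String × Int)) (d : PySem.Dict String Int)
    (hd : d.items ≠ []) :
    (l.foldl (fun d p => d.insert p.1 p.2) d).items ≠ [] := by
  induction l generalizing d with
  | nil => exact hd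
  | cons x xs ih => exact ih _ (pv_items_insert_ne x.1 x.2)

lemma pv_items_ofList_ne (p : List (String × Int)) (hp : p ≠ []) :
    (PySem.Dict.ofList p).items ≠ [] := by
  cases p with
  | nil => exact absurd rfl hp
  | cons x xs =>
      show ((x :: xs).foldl (fun d p => d.insert p.1 p.2) PySem.Dict.empty).items ≠ []
      · simp only [List.foldl_cons]
        exact pv_foldl_items_ne xs _ (pv_items_insert_ne x.1 x.2)

-- A's per-dict computation equals 7*c + pvFval p
lemma pv_step_eq (p : List (String × Int)) (hp : p ≠ []) (c : Int) (acc : List Int) :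
    (let d := PySem.Dict.ofList p
     match d.items with
     | [] => acc
     | (key, _) :: _ => acc ++ [7 * c + d.getD key 0]) = acc ++ [7 * c + pvFval p] := by
  cases hi : (PySem.Dict.ofList p).items with
  | nil => exact absurd hi (pv_items_ofList_ne p hp)
  | cons kv rest =>
      obtain ⟨key, v⟩ := kv
      simp only [hi]
      have hmem : (key, v) ∈ (PySem.Dict.ofList p).items := by rw [hi]; exact List.mem_cons_self ..
      have hget : (PySem.Dict.ofList p).getD key 0 = v :=
        PySem.Dict.getD_of_mem_items (PySem.Dict.ofList p) hmem (PySem.Dict.nodup_keys_ofList p) 0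
      rw [hget]
      simp [pvFval, hi]

-- A's loop over a list of nonempty dicts appends the mapped values
lemma pv_fold_eq (l : List (List (String × Int))) (hl : ∀ p ∈ l, p ≠ []) (c : Int)
    (acc : List Int) :
    (l.foldl (fun acc pair =>
      let d := PySem.Dict.ofList pair
      match d.items with
      | [] => acc
      | (key, _) :: _ => acc ++ [7 * c + d.getD key 0]) acc)
    = acc ++ l.map (fun p => 7 * c + pvFval p) := by
  induction l generalizing acc with
  | nil => simp
  | cons x xs ih =>
      rw [List.foldl_cons, pv_step_eq x (hl x (List.mem_cons_self ..)) c acc,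
        ih (fun p hp => hl p (List.mem_cons_of_mem _ hp))]
      simp

-- B's loop over pyRange 0 m: the deltas accumulate A's blocks, the week is base shifted by 7*m
lemma pv_shift_fold (vals : List Int) (m : Nat) :
    ((PySem.List.pyRange 0 (m : Int) 1).foldl
        (fun (acc : List Int × List Int) _ => (acc.1 ++ acc.2, acc.2.map (fun x => x + 7)))
        ([], vals))
    = ((PySem.List.pyRange 0 (m : Int) 1).foldl
        (fun acc i => acc ++ vals.map (fun v => 7 * i + v)) [],
       vals.map (fun v => v + 7 * (m : Int))) := by
  induction m with
  | zero =>
      rw [show ((0:Nat) : Int) = 0 by rfl, PySem.List.pyRange_one_eq_nil (le_refl 0)]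
      simp
  | succ m ih =>
      have hcast : ((m + 1 : Nat) : Int) = (m : Int) + 1 := by push_cast; ring
      rw [hcast, PySem.List.pyRange_one_succ_right (by positivity),
        List.foldl_append, List.foldl_append, ih]
      simp only [List.foldl_cons, List.foldl_nil, List.map_map]
      rw [Prod.mk.injEq]
      refine ⟨?_, ?_⟩
      · congr 1
        apply List.map_congr_left
        intro v _
        ring
      · apply List.map_congr_left
        intro v _
        simp only [Function.comp_apply]
        ring

-- A's nested bulk loops produce the same blocks, over any index list
lemma pv_Abulk_eq (ws : List (List (String × Int))) (hws : ∀ p ∈ ws, p ≠ [])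
    (L : List Int) (acc : List Int) :
    (L.foldl (fun acc i =>
      ws.foldl (fun acc pair =>
        let d := PySem.Dict.ofList pair
        match d.items with
        | [] => acc
        | (key, _) :: _ => acc ++ [7 * i + d.getD key 0]) acc) acc)
    = L.foldl (fun acc i => acc ++ (ws.map pvFval).map (fun v => 7 * i + v)) acc := by
  induction L generalizing acc with
  | nil => rfl
  | cons i L ih =>
      rw [List.foldl_cons, List.foldl_cons, pv_fold_eq ws hws i acc, ih, List.map_map]
      rfl

-- slicing the extracted values is extracting the sliced dicts
lemma pv_slice_map (ws : List (List (String × Int))) (r : Int) :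
    PySem.List.slice (ws.map pvFval) none (some r)
      = (PySem.List.slice ws none (some r)).map pvFval := by
  by_cases hr : 0 ≤ r
  · rw [PySem.List.slice_to _ hr, PySem.List.slice_to _ hr, List.map_take]
  · push Not at hr
    have hk : 0 < r.natAbs := by omega
    rw [show r = -((r.natAbs : Nat) : Int) by omega,
      PySem.List.slice_to_neg_natCast _ _ hk, PySem.List.slice_to_neg_natCast _ _ hk,
      List.map_take, List.length_map]

-- ===== VERDICT (by name: the statement is the Claim_ definition above) =====
theorem get_timedelta_spec : Claim_equal_get_timedelta := by
  intro w_list q r _hdom hpre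
  unfold Spec_get_timedelta get_timedelta get_timedelta_alt
  by_cases hguard : (w_list.isEmpty || q == 0) = true
  · rw [if_pos hguard, if_pos hguard]
  · rw [if_neg hguard, if_neg hguard]
    simp only [Bool.or_eq_true, not_or] at hguard
    have hw : w_list ≠ [] := by
      intro h; exact hguard.1 (by simp [h])
    have hq : q ≠ 0 := by
      intro h; exact hguard.2 (by simp [h])
    have hall : ∀ p ∈ w_list, p ≠ [] := by
      unfold Pre_get_timedelta at hpre
      simp only [Bool.or_eq_true] at hpre
      rcases hpre with (h | h) | h
      · exact absurd (List.isEmpty_iff.mp h) hw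
      · exact absurd (beq_iff_eq.mp h) hq
      · intro p hp hnil
        have hb := List.all_eq_true.mp h p hp
        subst hnil
        simp at hb
    simp only [Prod.mk.injEq, and_true]
    have hfv : (fun p => (((PySem.Dict.ofList p).items.head?).map Prod.snd).getD 0) = pvFval := rfl
    rw [hfv]
    have htail : ∀ p ∈ PySem.List.slice w_list none (some r), p ≠ [] :=
      fun p hp => hall p (PySem.List.mem_of_mem_slice w_list none (some r) hp)
    rw [pv_fold_eq _ htail q _, pv_slice_map, List.map_map, pv_Abulk_eq w_list hall]
    congr 1
    · -- the bulk parts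
      rcases lt_or_gt_of_ne hq with hneg | hpos
      · rw [PySem.List.pyRange_one_eq_nil (le_of_lt hneg), List.foldl_nil, List.foldl_nil]
      · rw [show q = (q.toNat : Int) by omega, pv_shift_fold]
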